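-- pv_equiv track=rewrite | github.com/Cozoob/Algorithms_and_data_structures | ASD-cwiczenia/Zestaw 4 Sortowanie liniowe/zad3.py | checkanagrams1
-- ===== SOURCE A (Python) =====
-- def checkanagrams1(word1, word2, alphabet):
--     if len(word1) != len(word2):
--         return False
--
--     # tworze tablice ktora pod odpowiednim indeksem
--     # zapisuje ile jest liter
--     count = [0 for _ in range(len(alphabet))]
--
--     for i in range(len(word1)):
--         letter = word1[i]
--         for j in range(len(alphabet)):
--             if alphabet[j] == letter:
--                 count[j] += 1
--
--     for a in range(len(word2)):
--         letter = word2[a]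
--         for b in range(len(alphabet)):
--             if alphabet[b] == letter:
--                 count[b] -= 1
--
--     # sprawdzamy czy wszystkie wyrazy w count sa rowne 0
--     # jesli tak to znaczy ze word1 i word2 sa anagramami
--     for c in range(len(count)):
--         if count[c] != 0:
--             return False
--
--     return True
-- ===== SOURCE B (Python) =====
-- def checkanagrams1(word1, word2, alphabet):
--     if len(word1) != len(word2):
--         return False
--     s = set(alphabet)
--     return sorted(c for c in word1 if c in s) == sorted(c for c in word2 if c in s)
-- ===== Notes on version B (the rewrite author's own statement) =====
-- stated objective: faster
-- what changed: Replaces the per-letter scan of the alphabet and the count array by filtering each word to alphabet letters (set membership) and comparing the two sorted filtrates.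
import Mathlib
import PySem

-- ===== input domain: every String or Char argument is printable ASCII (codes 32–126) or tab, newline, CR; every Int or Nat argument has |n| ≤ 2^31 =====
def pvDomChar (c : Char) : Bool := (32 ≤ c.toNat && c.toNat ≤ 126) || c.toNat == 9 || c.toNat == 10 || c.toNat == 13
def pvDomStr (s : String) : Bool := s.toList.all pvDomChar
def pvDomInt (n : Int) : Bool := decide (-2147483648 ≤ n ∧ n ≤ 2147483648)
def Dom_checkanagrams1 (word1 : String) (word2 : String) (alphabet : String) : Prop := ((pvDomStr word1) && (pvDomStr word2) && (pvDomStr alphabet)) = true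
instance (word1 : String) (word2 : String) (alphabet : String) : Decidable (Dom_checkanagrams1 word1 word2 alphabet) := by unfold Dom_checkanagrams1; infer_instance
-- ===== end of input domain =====

-- B replaces A's per-letter alphabet scans and count array by sort-and-compare of the
-- alphabet-filtered words (objective: faster).

-- ===== PORT A =====
-- inner loop 'for j in range(len(alphabet)): if alphabet[j] == letter: count[j] += 1'
-- as the structural recursion over (alphabet, count) in parallel
def pvInc (letter : Char) : List Char → List Int → List Int
  | a :: as, c :: cs => (if a == letter then c + 1 else c) :: pvInc letter as cs
  | _, cs => cs

-- the same inner loop with 'count[b] -= 1'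
def pvDec (letter : Char) : List Char → List Int → List Int
  | a :: as, c :: cs => (if a == letter then c - 1 else c) :: pvDec letter as cs
  | _, cs => cs

def checkanagrams1 (word1 : String) (word2 : String) (alphabet : String) : Bool :=
  if PySem.Str.len word1 ≠ PySem.Str.len word2 then false
  else
    let count : List Int := (List.range alphabet.toList.length).map (fun _ => (0 : Int))
    let count := word1.toList.foldl (fun cnt letter => pvInc letter alphabet.toList cnt) count
    let count := word2.toList.foldl (fun cnt letter => pvDec letter alphabet.toList cnt) count
    -- 'for c in range(len(count)): if count[c] != 0: return False / return True'
    count.all (fun c => c == 0)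

-- ===== PORT B =====
def checkanagrams1_alt (word1 : String) (word2 : String) (alphabet : String) : Bool :=
  if PySem.Str.len word1 ≠ PySem.Str.len word2 then false
  else
    let s := PySem.Set.ofList alphabet.toList
    PySem.List.sorted (word1.toList.filter (fun c => PySem.Set.contains s c)) (fun x => x) false
      == PySem.List.sorted (word2.toList.filter (fun c => PySem.Set.contains s c)) (fun x => x) false

-- ===== PRECONDITION & SPEC =====
def Spec_checkanagrams1 (word1 : String) (word2 : String) (alphabet : String) (out : Bool) : Prop := out = checkanagrams1_alt word1 word2 alphabet
instance (word1 : String) (word2 : String) (alphabet : String) (out : Bool) : Decidable (Spec_checkanagrams1 word1 word2 alphabet out) := by unfold Spec_checkanagrams1; infer_instance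

-- ===== CLAIM (what is proved, stated in full; the proofs are below) =====
def Claim_equal_checkanagrams1 : Prop := ∀ (word1 : String) (word2 : String) (alphabet : String), Dom_checkanagrams1 word1 word2 alphabet → Spec_checkanagrams1 word1 word2 alphabet (checkanagrams1 word1 word2 alphabet)

-- ===== LEMMAS AND PROOFS =====

theorem pvInc_map (letter : Char) (al : List Char) (g : Char → Int) :
    pvInc letter al (al.map g) = al.map (fun a => if a == letter then g a + 1 else g a) := by
  induction al with
  | nil => simp [pvInc]
  | cons a as ih => simp [pvInc, ih]

theorem pvDec_map (letter : Char) (al : List Char) (g : Char → Int) :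
    pvDec letter al (al.map g) = al.map (fun a => if a == letter then g a - 1 else g a) := by
  induction al with
  | nil => simp [pvDec]
  | cons a as ih => simp [pvDec, ih]

theorem foldl_pvInc (w al : List Char) (g : Char → Int) :
    w.foldl (fun cnt letter => pvInc letter al cnt) (al.map g)
      = al.map (fun a => g a + (w.count a : Int)) := by
  induction w generalizing g with
  | nil => simp
  | cons h t ih =>
      simp only [List.foldl_cons, pvInc_map]
      rw [ih]
      apply List.map_congr_left
      intro a _
      by_cases hab : a = h
      · subst hab; simp; ring
      · have : (a == h) = false := by simp [hab]
        simp [this, Ne.symm hab]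

theorem foldl_pvDec (w al : List Char) (g : Char → Int) :
    w.foldl (fun cnt letter => pvDec letter al cnt) (al.map g)
      = al.map (fun a => g a - (w.count a : Int)) := by
  induction w generalizing g with
  | nil => simp
  | cons h t ih =>
      simp only [List.foldl_cons, pvDec_map]
      rw [ih]
      apply List.map_congr_left
      intro a _
      by_cases hab : a = h
      · subst hab; simp; ring
      · have : (a == h) = false := by simp [hab]
        simp [this, Ne.symm hab]

theorem count_filter_bool (p : Char → Bool) (w : List Char) (a : Char) :
    (w.filter p).count a = if p a then w.count a else 0 := by
  induction w with
  | nil => simp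
  | cons h t ih =>
      by_cases hp : p h = true
      · by_cases hah : h = a
        · subst hah; simp [hp, ih]
        · have hba : (h == a) = false := by simp [hah]
          simp [hp, List.count_cons, hba, ih]
      · have hp' : p h = false := by simpa using hp
        by_cases hah : h = a
        · subst hah; simp [hp', ih]
        · have hba : (h == a) = false := by simp [hah]
          rw [List.filter_cons, if_neg (by simp [hp'] : ¬ p h = true), ih]
          by_cases hpa : p a = true <;> simp [hpa, List.count_cons, hba]

theorem contains_ofList_eq (al : List Char) (a : Char) :
    PySem.Set.contains (PySem.Set.ofList al) a = decide (a ∈ al) := by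
  by_cases hm : a ∈ al
  · simp [hm, PySem.Set.mem_ofList]
  · simp only [hm, decide_false]
    rw [← Bool.not_eq_true, PySem.Set.contains_iff, PySem.Set.mem_ofList]
    exact hm

theorem count_filter_mem (w al : List Char) (a : Char) :
    (w.filter (fun c => PySem.Set.contains (PySem.Set.ofList al) c)).count a
      = if a ∈ al then w.count a else 0 := by
  rw [count_filter_bool, contains_ofList_eq]
  by_cases hm : a ∈ al <;> simp [hm]

-- the core: A's all-zero test equals B's sorted-filtrate comparison
theorem core_eq (w1 w2 al : List Char) :
    ((al.map (fun a => (w1.count a : Int) - (w2.count a : Int))).all (fun c => c == 0))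
      = (PySem.List.sorted (w1.filter (fun c => PySem.Set.contains (PySem.Set.ofList al) c)) (fun x => x) false
          == PySem.List.sorted (w2.filter (fun c => PySem.Set.contains (PySem.Set.ofList al) c)) (fun x => x) false) := by
  rw [Bool.eq_iff_iff]
  constructor
  · intro h
    rw [beq_iff_eq, PySem.List.sorted_id_eq_sorted_id_iff_perm, List.perm_iff_count]
    intro a
    rw [count_filter_mem, count_filter_mem]
    by_cases hm : a ∈ al
    · simp only [hm, if_true]
      have := List.all_eq_true.mp h _ (List.mem_map.mpr ⟨a, hm, rfl⟩)
      have h0 : (w1.count a : Int) - (w2.count a : Int) = 0 := by simpa using this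
      omega
    · simp [hm]
  · intro h
    rw [beq_iff_eq, PySem.List.sorted_id_eq_sorted_id_iff_perm, List.perm_iff_count] at h
    rw [List.all_eq_true]
    intro x hx
    obtain ⟨a, hm, rfl⟩ := List.mem_map.mp hx
    have := h a
    rw [count_filter_mem, count_filter_mem] at this
    simp only [hm, if_true] at this
    simp [this]

-- ===== VERDICT (by name: the statement is the Claim_ definition above) =====
theorem checkanagrams1_spec : Claim_equal_checkanagrams1 := by
  intro word1 word2 alphabet _
  unfold Spec_checkanagrams1 checkanagrams1 checkanagrams1_alt
  by_cases hn : word1.toList.length = word2.toList.length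
  · have hlen : ¬ PySem.Str.len word1 ≠ PySem.Str.len word2 := by
      simp [PySem.Str.len_eq, String.length_toList, hn]
    rw [if_neg hlen, if_neg hlen]
    dsimp only []
    have hinit : (List.range alphabet.toList.length).map (fun _ => (0 : Int))
        = alphabet.toList.map (fun _ => (0 : Int)) := by
      simp [List.map_const']
    rw [hinit, foldl_pvInc, foldl_pvDec]
    have hz : (alphabet.toList.map fun a => (0 : Int) + (word1.toList.count a : Int) - (word2.toList.count a : Int))
        = alphabet.toList.map (fun a => (word1.toList.count a : Int) - (word2.toList.count a : Int)) := by
      simp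
    rw [hz, core_eq]
  · have hlen : PySem.Str.len word1 ≠ PySem.Str.len word2 := by
      simp only [PySem.Str.len_eq, ne_eq, Int.natCast_inj]
      exact hn
    rw [if_pos hlen, if_pos hlen]
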